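-- pv_equiv track=rewrite | github.com/utsho34/python-DSA | weekly solving in vjudge/ERP_23_weekly_solving/A.py | max_permutation
-- ===== SOURCE A (Python) =====
-- def max_permutation(n, k):
--     sol = []
--     switch = k
--     if k == 0:
--         return [x for x in range(1, n+1)]
--
--     if n % (2*k) != 0:
--         return [-1]
--
--     for p in range(1, n + 1):
--         sol.append(p + switch)
--
--         if p % k == 0:
--             switch *= -1
--
--     return sol
-- ===== SOURCE B (Python) =====
-- def max_permutation(n, k):
--     if k == 0:
--         return list(range(1, n + 1))
--     if n % (2 * k) != 0:
--         return [-1]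
--     a = abs(k)
--     res = []
--     for start in range(0, n, 2 * a):
--         res += list(range(start + 1 + k, start + a + 1 + k))
--         res += list(range(start + a + 1 - k, start + 2 * a + 1 - k))
--     return res
-- ===== Notes on version B (the rewrite author's own statement) =====
-- stated objective: alternative
-- what changed: Replaces A's single per-element loop that appends p+switch while toggling a sign accumulator with a block-pair construction: same two guards, then for each block start in range(0, n, 2*abs(k)) it concatenates two ready-made ranges (the +k-shifted block and the -k-shifted block), with no per-element state.
import Mathlib
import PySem

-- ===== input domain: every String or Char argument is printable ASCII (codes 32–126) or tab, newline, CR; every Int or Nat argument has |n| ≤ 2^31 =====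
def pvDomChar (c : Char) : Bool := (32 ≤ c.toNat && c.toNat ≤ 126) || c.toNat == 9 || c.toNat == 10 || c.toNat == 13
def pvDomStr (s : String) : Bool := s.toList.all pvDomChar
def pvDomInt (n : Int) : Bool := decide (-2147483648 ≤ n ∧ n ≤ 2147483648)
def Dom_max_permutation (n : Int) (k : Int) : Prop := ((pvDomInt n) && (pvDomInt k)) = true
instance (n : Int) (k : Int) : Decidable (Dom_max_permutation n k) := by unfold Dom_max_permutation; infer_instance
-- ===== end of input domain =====

-- B replaces A's per-element loop with a sign-flipping accumulator by a block-pair construction: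
-- for each block start it appends two ready-made ranges (objective: alternative, same O(n) cost).

-- ===== PORT A =====
-- literal port of A: fold over range(1, n+1) carrying (sol, switch)
def max_permutation (n : Int) (k : Int) : List Int :=
  if k = 0 then PySem.List.pyRange 1 (n + 1) 1
  else if PySem.Int.mod n (2 * k) ≠ 0 then [-1]
  else
    ((PySem.List.pyRange 1 (n + 1) 1).foldl
      (fun (st : List Int × Int) p =>
        let sol := st.1 ++ [p + st.2]
        if PySem.Int.mod p k = 0 then (sol, st.2 * -1) else (sol, st.2))
      ([], k)).1

-- ===== PORT B =====
-- literal port of B: same two guards, then for each start in range(0, n, 2*a)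
-- append the two block ranges range(start+1+k, start+a+1+k) and range(start+a+1-k, start+2a+1-k)
def max_permutation_alt (n : Int) (k : Int) : List Int :=
  if k = 0 then PySem.List.pyRange 1 (n + 1) 1
  else if PySem.Int.mod n (2 * k) ≠ 0 then [-1]
  else
    let a : Int := |k|
    (PySem.List.pyRange 0 n (2 * a)).foldl
      (fun res start =>
        res ++ PySem.List.pyRange (start + 1 + k) (start + a + 1 + k) 1
            ++ PySem.List.pyRange (start + a + 1 - k) (start + 2 * a + 1 - k) 1)
      []

-- ===== PRECONDITION & SPEC =====
def Spec_max_permutation (n : Int) (k : Int) (out : List Int) : Prop := out = max_permutation_alt n k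
instance (n : Int) (k : Int) (out : List Int) : Decidable (Spec_max_permutation n k out) := by unfold Spec_max_permutation; infer_instance

-- ===== CLAIM =====
def Claim_equal_max_permutation : Prop := ∀ (n : Int) (k : Int), Dom_max_permutation n k → Spec_max_permutation n k (max_permutation n k)

-- ===== LEMMAS AND PROOFS =====

-- A's loop body, named for the proofs
def pvStep (k : Int) (st : List Int × Int) (p : Int) : List Int × Int :=
  let sol := st.1 ++ [p + st.2]
  if PySem.Int.mod p k = 0 then (sol, st.2 * -1) else (sol, st.2)

-- closed-form bridge: the element A emits at position p
def pvElem (k : Int) (p : Int) : Int :=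
  if PySem.Int.mod (PySem.Int.floordiv (p - 1) |k|) 2 = 0 then p + k else p - k

-- the value of A's 'switch' after processing 1..m
def pvSign (k : Int) (m : Nat) : Int :=
  if (m / k.natAbs) % 2 = 0 then k else -k

-- B's block pair at a given start
def pvBlock (k : Int) (s : Int) : List Int :=
  PySem.List.pyRange (s + 1 + k) (s + |k| + 1 + k) 1
    ++ PySem.List.pyRange (s + |k| + 1 - k) (s + 2 * |k| + 1 - k) 1

lemma pvElem_succ (k : Int) (m : Nat) :
    pvElem k ((m : Int) + 1) = ((m : Int) + 1) + pvSign k m := by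
  have hd : |k| = ((k.natAbs : Nat) : Int) := Int.abs_eq_natAbs k
  unfold pvElem pvSign
  rw [show ((m : Int) + 1 - 1) = (m : Int) by ring, hd,
      PySem.Int.floordiv_natCast m k.natAbs,
      show ((2 : Int) = ((2 : Nat) : Int)) by norm_num,
      PySem.Int.mod_natCast]
  split_ifs with h1 h2 h2
  · rfl
  · exact absurd (by exact_mod_cast h1) h2
  · exact absurd (by exact_mod_cast h2) h1
  · ring

lemma pvSign_succ (k : Int) (m : Nat) :
    (if PySem.Int.mod ((m : Int) + 1) k = 0 then pvSign k m * -1 else pvSign k m)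
      = pvSign k (m + 1) := by
  have hdvd : PySem.Int.mod ((m : Int) + 1) k = 0 ↔ k.natAbs ∣ (m + 1) := by
    rw [PySem.Int.mod_eq_zero_iff_dvd,
        show ((m : Int) + 1) = (((m + 1 : Nat) : Int)) by push_cast; ring]
    constructor
    · intro h
      have h2 := Int.natAbs_dvd_natAbs.mpr h
      rwa [Int.natAbs_natCast] at h2
    · intro h
      have h' : (k.natAbs : Int) ∣ (((m + 1 : Nat) : Int)) := by exact_mod_cast h
      exact Int.natAbs_dvd.mp h'
  unfold pvSign
  rw [Nat.succ_div]
  by_cases hD : k.natAbs ∣ (m + 1)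
  · rw [if_pos (hdvd.mpr hD), if_pos hD]
    by_cases hp : (m / k.natAbs) % 2 = 0
    · rw [if_pos hp, if_neg (by omega)]; ring
    · rw [if_neg hp, if_pos (by omega)]; ring
  · rw [if_neg (fun h => hD (hdvd.mp h)), if_neg hD, add_zero]

-- A's loop invariant: after folding 1..m, state is (map pvElem of the range, current switch)
lemma pv_loop_inv (k : Int) (m : Nat) :
    (PySem.List.pyRange 1 ((m : Int) + 1) 1).foldl (pvStep k) ([], k)
      = ((PySem.List.pyRange 1 ((m : Int) + 1) 1).map (pvElem k), pvSign k m) := by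
  induction m with
  | zero =>
      simp [PySem.List.pyRange, pvSign]
  | succ m ih =>
      have h1 : (1 : Int) ≤ (m : Int) + 1 := by omega
      have hr : PySem.List.pyRange 1 ((m : Int) + 1 + 1) 1
          = PySem.List.pyRange 1 ((m : Int) + 1) 1 ++ [(m : Int) + 1] := by
        exact PySem.List.pyRange_one_succ_right h1
      rw [show (((m + 1 : Nat) : Int) + 1) = ((m : Int) + 1 + 1) by push_cast; ring, hr,
          List.foldl_append, ih, List.map_append]
      show pvStep k _ _ = _
      unfold pvStep
      simp only [List.map_cons, List.map_nil]
      rw [← pvElem_succ k m]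
      have hs := pvSign_succ k m
      split_ifs with h
      · rw [if_pos h] at hs; rw [hs]
      · rw [if_neg h] at hs; rw [hs]

-- shifting a unit-step range
lemma pvRange_map_add (x y c : Int) :
    (PySem.List.pyRange x y 1).map (fun p => p + c) = PySem.List.pyRange (x + c) (y + c) 1 := by
  rw [PySem.List.pyRange_one x y, PySem.List.pyRange_one (x + c) (y + c),
      show (y + c - (x + c)) = y - x by ring, List.map_map]
  refine List.map_congr_left ?_
  intro j _
  simp; ring

-- B's block pair equals the bridge map on its 2|k| elements
lemma pvBlock_eq_map (k : Int) (hk : k ≠ 0) (m : Nat) :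
    (PySem.List.pyRange (2 * |k| * (m : Int) + 1) (2 * |k| * (m : Int) + 2 * |k| + 1) 1).map (pvElem k)
      = pvBlock k (2 * |k| * (m : Int)) := by
  have ha : 0 < |k| := abs_pos.mpr hk
  set s : Int := 2 * |k| * (m : Int) with hs
  have hsplit : PySem.List.pyRange (s + 1) (s + 2 * |k| + 1) 1
      = PySem.List.pyRange (s + 1) (s + |k| + 1) 1 ++ PySem.List.pyRange (s + |k| + 1) (s + 2 * |k| + 1) 1 :=
    PySem.List.pyRange_one_append _ _ _ (by omega) (by omega)
  rw [show s + 1 = s + 1 by rfl] at hsplit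
  unfold pvBlock
  rw [hsplit, List.map_append]
  congr 1
  · -- first half: floordiv (p-1) |k| = 2m, even → pvElem p = p + k
    rw [← pvRange_map_add (s + 1) (s + |k| + 1) k]
    refine List.map_congr_left ?_
    intro p hp
    have hb := (PySem.List.mem_pyRange_one).mp hp
    unfold pvElem
    have hq : PySem.Int.floordiv (p - 1) |k| = 2 * (m : Int) := by
      rw [PySem.Int.floordiv_eq_iff_of_pos ha]
      constructor
      · have : 2 * (m : Int) * |k| = s := by rw [hs]; ring
        omega
      · have : (2 * (m : Int) + 1) * |k| = s + |k| := by rw [hs]; ring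
        omega
    rw [hq, if_pos (by rw [PySem.Int.mod_eq_zero_iff_dvd]; exact ⟨(m : Int), rfl⟩)]
  · -- second half: floordiv (p-1) |k| = 2m+1, odd → pvElem p = p - k
    have hrw : PySem.List.pyRange (s + |k| + 1 - k) (s + 2 * |k| + 1 - k) 1
        = (PySem.List.pyRange (s + |k| + 1) (s + 2 * |k| + 1) 1).map (fun p => p + (-k)) := by
      rw [pvRange_map_add, sub_eq_add_neg, sub_eq_add_neg]
    rw [hrw]
    refine List.map_congr_left ?_
    intro p hp
    have hb := (PySem.List.mem_pyRange_one).mp hp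
    unfold pvElem
    have hq : PySem.Int.floordiv (p - 1) |k| = 2 * (m : Int) + 1 := by
      rw [PySem.Int.floordiv_eq_iff_of_pos ha]
      constructor
      · have : (2 * (m : Int) + 1) * |k| = s + |k| := by rw [hs]; ring
        omega
      · have : (2 * (m : Int) + 1 + 1) * |k| = s + 2 * |k| := by rw [hs]; ring
        omega
    have hodd : PySem.Int.mod (2 * (m : Int) + 1) 2 ≠ 0 := by
      intro h
      rw [PySem.Int.mod_eq_zero_iff_dvd] at h
      obtain ⟨c, hc⟩ := h
      omega
    rw [hq, if_neg hodd]
    ring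

-- the start list of B's loop
lemma pvStarts (a : Int) (ha : 0 < a) (m : Nat) :
    PySem.List.pyRange 0 (2 * a * (m : Int)) (2 * a)
      = (List.range m).map (fun j : Nat => 2 * a * (j : Int)) := by
  rw [PySem.List.pyRange_of_pos _ _ (by omega)]
  have hcount : (if (0 : Int) < 2 * a * (m : Int)
      then ((2 * a * (m : Int) - 0 + (2 * a) - 1) / (2 * a)).toNat else 0) = m := by
    cases m with
    | zero => simp
    | succ m' =>
        rw [if_pos (by positivity)]
        have h1 : 2 * a * (((m' : Nat) + 1 : Nat) : Int) - 0 + (2 * a) - 1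
            = (2 * a - 1) + (((m' : Nat) + 1 : Nat) : Int) * (2 * a) := by push_cast; ring
        rw [h1, Int.add_mul_ediv_right _ _ (by omega : (2 * a) ≠ 0),
            Int.ediv_eq_zero_of_lt (by omega) (by omega)]
        simp
  rw [hcount]
  exact List.map_congr_left (fun j _ => by ring)

-- B's fold builds the bridge map, block by block
lemma pv_fold_blocks (k : Int) (hk : k ≠ 0) (m : Nat) :
    (PySem.List.pyRange 0 (2 * |k| * (m : Int)) (2 * |k|)).foldl
        (fun res start =>
          res ++ PySem.List.pyRange (start + 1 + k) (start + |k| + 1 + k) 1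
              ++ PySem.List.pyRange (start + |k| + 1 - k) (start + 2 * |k| + 1 - k) 1) []
      = (PySem.List.pyRange 1 (2 * |k| * (m : Int) + 1) 1).map (pvElem k) := by
  have ha : 0 < |k| := abs_pos.mpr hk
  induction m with
  | zero =>
      have h1 : PySem.List.pyRange 0 (2 * |k| * (((0 : Nat)) : Int)) (2 * |k|) = [] := by
        rw [show (((0 : Nat)) : Int) = 0 from rfl, mul_zero,
            PySem.List.pyRange_of_pos _ _ (by omega : (0:Int) < 2 * |k|), if_neg (by omega)]
        rfl
      have h2 : PySem.List.pyRange 1 (2 * |k| * (((0 : Nat)) : Int) + 1) 1 = [] := by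
        rw [show (((0 : Nat)) : Int) = 0 from rfl, mul_zero, zero_add]
        exact PySem.List.pyRange_one_eq_nil le_rfl
      rw [h1, h2]
      rfl
  | succ m ih =>
      rw [pvStarts _ (by omega) (m + 1), List.range_succ, List.map_append, List.foldl_append,
          ← pvStarts _ (by omega) m, ih]
      simp only [List.map_cons, List.map_nil, List.foldl_cons, List.foldl_nil]
      have hsplit : PySem.List.pyRange 1 (2 * |k| * ((m + 1 : Nat) : Int) + 1) 1
          = PySem.List.pyRange 1 (2 * |k| * (m : Int) + 1) 1
            ++ PySem.List.pyRange (2 * |k| * (m : Int) + 1) (2 * |k| * ((m + 1 : Nat) : Int) + 1) 1 :=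
        PySem.List.pyRange_one_append _ _ _
          (by nlinarith [abs_nonneg k, Int.natCast_nonneg m])
          (by push_cast
              nlinarith [ha, Int.natCast_nonneg m])
      rw [hsplit, List.map_append]
      have hend : 2 * |k| * ((m + 1 : Nat) : Int) + 1 = 2 * |k| * (m : Int) + 2 * |k| + 1 := by
        push_cast; ring
      rw [hend, pvBlock_eq_map k hk m]
      unfold pvBlock
      rw [List.append_assoc]

-- ===== VERDICT =====
theorem max_permutation_spec : Claim_equal_max_permutation := by
  intro n k _
  unfold Spec_max_permutation max_permutation max_permutation_alt
  by_cases hk : k = 0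
  · simp [hk]
  · rw [if_neg hk, if_neg hk]
    by_cases hm : PySem.Int.mod n (2 * k) = 0
    · rw [if_neg (by simpa using hm), if_neg (by simpa using hm)]
      have ha : 0 < |k| := abs_pos.mpr hk
      change ((PySem.List.pyRange 1 (n + 1) 1).foldl (pvStep k) ([], k)).1
          = (PySem.List.pyRange 0 n (2 * |k|)).foldl
              (fun res start =>
                res ++ PySem.List.pyRange (start + 1 + k) (start + |k| + 1 + k) 1
                    ++ PySem.List.pyRange (start + |k| + 1 - k) (start + 2 * |k| + 1 - k) 1) []
      by_cases hn : 0 < n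
      · -- n > 0 and 2k ∣ n: n = 2|k| * m
        have hdvd : (2 * k) ∣ n := (PySem.Int.mod_eq_zero_iff_dvd n (2 * k)).mp hm
        have hdvd' : (2 * |k|) ∣ n := by
          rw [show (2 * |k|) = |2 * k| by rw [abs_mul]; norm_num]
          exact (abs_dvd _ _).mpr hdvd
        obtain ⟨c, hc⟩ := hdvd'
        have hc0 : 0 < c := by nlinarith
        obtain ⟨m, hm'⟩ := Int.eq_ofNat_of_zero_le hc0.le
        have hn' : n = 2 * |k| * (m : Int) := by rw [hc, hm']
        have hcast : (((2 * k.natAbs * m : Nat)) : Int) = 2 * |k| * (m : Int) := by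
          rw [Int.abs_eq_natAbs]
          push_cast
          ring
        rw [hn', ← hcast, pv_loop_inv k (2 * k.natAbs * m), hcast,
            pv_fold_blocks k hk m]
      · -- n ≤ 0: both loops are empty
        have he : PySem.List.pyRange 1 (n + 1) 1 = [] :=
          PySem.List.pyRange_one_eq_nil (by omega)
        have he2 : PySem.List.pyRange 0 n (2 * |k|) = [] := by
          rw [PySem.List.pyRange_of_pos _ _ (by omega : (0:Int) < 2 * |k|)]
          rw [if_neg (by omega)]
          simp
        rw [he, he2]
        rfl
    · rw [if_pos (by simpa using hm), if_pos (by simpa using hm)]
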